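-- pv_equiv track=rewrite | github.com/Mahdjouu/Message_de_bienvenue | message_de_bienvenue.py | hello_plusieurs_noms
-- ===== SOURCE A (Python) =====
-- def hello_nom(nom):
--     if isinstance(nom, str):
--         if len(nom) > 0:
--             nom = nom[0].upper() + nom[1:]
--             hello = "Hello, " + nom
--             return hello
--         else:
--             return "error"
--
--     else:
--         return "error"
--
-- def hello_plusieurs_noms(noms):
--     nom = ""
--     noms_traites = ""
--     j = 0
--     for i in range(0, len(noms)):
--         if noms[i] == ",":
--             nom = noms[j:i + 1]
--             nom = nom[0].upper() + nom[1:]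
--             noms_traites += nom + " "
--             j = i + 1
--     nom = noms[j:]
--     nom = nom[0].upper() + nom[1:]
--     noms_traites += nom
--     return hello_nom(noms_traites)
-- ===== SOURCE B (Python) =====
-- def hello_nom(nom):
--     if isinstance(nom, str):
--         if len(nom) > 0:
--             nom = nom[0].upper() + nom[1:]
--             hello = "Hello, " + nom
--             return hello
--         else:
--             return "error"
--
--     else:
--         return "error"
--
-- def _cap(s):
--     return s[0].upper() + s[1:]
--
-- def hello_plusieurs_noms(noms):
--     parts = noms.split(",")
--     segs = [_cap(p + ",") for p in parts[:-1]] + [_cap(parts[-1])]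
--     return hello_nom(" ".join(segs))
-- ===== Notes on version B (the rewrite author's own statement) =====
-- stated objective: idiomatic
-- what changed: A scans characters by index, slicing out each segment at every comma with manual bookkeeping of the last cut position; B splits once on the comma separator, capitalizes each part (re-appending the separator to all but the last) and joins the parts with a single space.
import Mathlib
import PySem

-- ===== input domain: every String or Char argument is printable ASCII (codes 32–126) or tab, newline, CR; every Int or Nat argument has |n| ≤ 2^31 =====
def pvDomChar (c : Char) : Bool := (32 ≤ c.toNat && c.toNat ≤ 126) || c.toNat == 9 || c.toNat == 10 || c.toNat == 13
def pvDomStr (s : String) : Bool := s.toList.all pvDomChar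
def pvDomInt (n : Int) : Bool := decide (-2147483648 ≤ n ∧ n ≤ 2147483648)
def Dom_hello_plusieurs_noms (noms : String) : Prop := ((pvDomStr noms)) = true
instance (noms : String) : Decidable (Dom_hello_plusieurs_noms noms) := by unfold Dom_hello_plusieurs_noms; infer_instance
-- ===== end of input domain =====

-- B replaces A's index-and-slice loop by split(",") + capitalize each part + " ".join (objective: idiomatic).


-- ===== PORT A =====
-- port of the module helper hello_nom (the isinstance check is dropped: the argument is always a str here)
def helloNom (s : List Char) : List Char :=
  if 0 < s.length then
    match PySem.List.pyGet? s 0 with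
    | some c => ("Hello, ".toList) ++ (PySem.Chars.upperChar c :: PySem.List.slice s (some 1) none)
    | none => "error".toList   -- unreachable: s is nonempty here
  else "error".toList

-- body of A's 'for i in range(0, len(noms))' loop; state = (noms_traites, j)
def stepA (cs : List Char) (st : List Char × Int) (i : Int) : List Char × Int :=
  if PySem.List.pyGetD cs i ' ' = ',' then   -- noms[i]: every i in range(0, len(noms)) is in range
    let nom := PySem.List.slice cs (some st.2) (some (i + 1))
    match PySem.List.pyGet? nom 0 with
    | some c => (st.1 ++ (PySem.Chars.upperChar c :: PySem.List.slice nom (some 1) none) ++ [' '], i + 1)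
    | none => (st.1, i + 1)   -- unreachable: nom contains the comma noms[i]
  else st

-- A's code after the loop
def finishA (cs : List Char) (st : List Char × Int) : String :=
  let nom := PySem.List.slice cs (some st.2) none
  match PySem.List.pyGet? nom 0 with
  | some c => String.ofList (helloNom (st.1 ++ (PySem.Chars.upperChar c :: PySem.List.slice nom (some 1) none)))
  | none => ""   -- Python raises IndexError here (empty final segment); excluded by Pre_

def hello_plusieurs_noms (noms : String) : String :=
  let cs := noms.toList
  finishA cs ((PySem.List.pyRange 0 cs.length).foldl (stepA cs) ([], 0))

-- ===== PORT B =====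
-- port of B's helper _cap
def capChars (s : List Char) : List Char :=
  match PySem.List.pyGet? s 0 with
  | some c => PySem.Chars.upperChar c :: PySem.List.slice s (some 1) none
  | none => []   -- Python raises IndexError on "" ; reachable only for an empty last part, excluded by Pre_

def hello_plusieurs_noms_alt (noms : String) : String :=
  let parts := PySem.Chars.splitOn noms.toList [',']
  let segs := (PySem.List.slice parts none (some (-1))).map (fun p => capChars (p ++ [','])) ++
              [capChars (PySem.List.pyGetD parts (-1) [])]
  String.ofList (helloNom (PySem.Chars.join [' '] segs))

-- ===== PRECONDITION & SPEC =====
-- Pre_ excludes the empty string and strings ending in ',': there the final segment is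
-- empty and both A and B raise IndexError on its [0].
def Pre_hello_plusieurs_noms (noms : String) : Prop :=
  noms.toList ≠ [] ∧ noms.toList.getLast? ≠ some ','
instance (noms : String) : Decidable (Pre_hello_plusieurs_noms noms) := by
  unfold Pre_hello_plusieurs_noms; infer_instance
def pvWitness_hello_plusieurs_noms : String := "alice,bob"

def Spec_hello_plusieurs_noms (noms : String) (out : String) : Prop := out = hello_plusieurs_noms_alt noms
instance (noms : String) (out : String) : Decidable (Spec_hello_plusieurs_noms noms out) := by unfold Spec_hello_plusieurs_noms; infer_instance

-- ===== CLAIM (what is proved, stated in full; the proofs are below) =====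
def Claim_equal_hello_plusieurs_noms : Prop := ∀ (noms : String), Dom_hello_plusieurs_noms noms → Pre_hello_plusieurs_noms noms → Spec_hello_plusieurs_noms noms (hello_plusieurs_noms noms)

-- ===== LEMMAS AND PROOFS =====

-- proof-side: the comma-separated segments of a string, by structural recursion
def segsP : List Char → List (List Char)
  | [] => [[]]
  | c :: rest =>
      if c = ',' then [] :: segsP rest
      else match segsP rest with
           | [] => [[c]]          -- unreachable: segsP never returns []
           | p :: ps => (c :: p) :: ps

-- proof-side: one left-to-right pass building A's noms_traites (none = empty last segment)
def goSeg : List Char → List Char → Option (List Char)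
  | cur, [] => if cur = [] then none else some (capChars cur)
  | cur, c :: rest =>
      if c = ',' then (goSeg [] rest).map (fun t => capChars (cur ++ [',']) ++ ' ' :: t)
      else goSeg (cur ++ [c]) rest

-- proof-side: the same pass expressed on the list of segments
def buildSegs : List (List Char) → Option (List Char)
  | [] => none
  | [p] => if p = [] then none else some (capChars p)
  | p :: q :: ps => (buildSegs (q :: ps)).map (fun t => capChars (p ++ [',']) ++ ' ' :: t)

-- proof-side: fuel-free version of PySem.Chars.splitOn.go for the one-char separator ","
def mySplit : List Char → List Char → List (List Char) → List (List Char)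
  | [], cur, acc => (cur.reverse :: acc).reverse
  | c :: rest, cur, acc =>
      if c = ',' then mySplit rest [] (cur.reverse :: acc) else mySplit rest (c :: cur) acc

lemma segsP_ne_nil : ∀ l, segsP l ≠ [] := by
  intro l
  cases l with
  | nil => simp [segsP]
  | cons c rest =>
    simp only [segsP]
    split
    · simp
    · cases h : segsP rest <;> simp

lemma go_eq_mySplit : ∀ (fuel : Nat) (l cur : List Char) (acc : List (List Char)),
    l.length < fuel →
    PySem.Chars.splitOn.go [','] fuel l cur acc = mySplit l cur acc := by
  intro fuel
  induction fuel with
  | zero => intro l cur acc h; omega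
  | succ f ih =>
    intro l cur acc h
    cases l with
    | nil => simp [PySem.Chars.splitOn.go, mySplit]
    | cons c rest =>
      rw [PySem.Chars.splitOn.go]
      by_cases hc : c = ','
      · subst hc
        have hp : [','].isPrefixOf (',' :: rest) = true := by simp [List.isPrefixOf]
        simp only [hp, if_pos]
        rw [ih _ _ _ (by simpa using Nat.lt_of_succ_lt_succ h)]
        simp [mySplit]
      · have hp : [','].isPrefixOf (c :: rest) = false := by
          simp [List.isPrefixOf]; intro hh; exact absurd hh.symm hc
        simp only [hp]
        rw [if_neg (by simp)]
        rw [ih _ _ _ (by simpa using Nat.lt_of_succ_lt_succ h)]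
        simp [mySplit, hc]

lemma mySplit_eq : ∀ (l cur : List Char) (acc : List (List Char)),
    mySplit l cur acc = acc.reverse ++
      (match segsP l with | [] => [] | p :: ps => (cur.reverse ++ p) :: ps) := by
  intro l
  induction l with
  | nil => intro cur acc; simp [mySplit, segsP]
  | cons c rest ih =>
    intro cur acc
    by_cases hc : c = ','
    · subst hc
      simp only [mySplit, segsP]
      rw [ih]
      cases h : segsP rest with
      | nil => exact absurd h (segsP_ne_nil rest)
      | cons p ps => simp
    · simp only [mySplit, if_neg hc, segsP]
      rw [ih]
      cases h : segsP rest with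
      | nil => exact absurd h (segsP_ne_nil rest)
      | cons p ps => simp

lemma splitOn_eq_segsP (cs : List Char) : PySem.Chars.splitOn cs [','] = segsP cs := by
  rw [PySem.Chars.splitOn, go_eq_mySplit _ _ _ _ (by omega), mySplit_eq]
  cases h : segsP cs with
  | nil => exact absurd h (segsP_ne_nil cs)
  | cons p ps => simp

lemma goSeg_eq_buildSegs : ∀ (cs cur : List Char),
    goSeg cur cs = buildSegs (match segsP cs with | [] => [] | p :: ps => (cur ++ p) :: ps) := by
  intro cs
  induction cs with
  | nil => intro cur; simp [goSeg, segsP, buildSegs]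
  | cons c rest ih =>
    intro cur
    by_cases hc : c = ','
    · subst hc
      simp only [goSeg, segsP]
      rw [ih []]
      cases h : segsP rest with
      | nil => exact absurd h (segsP_ne_nil rest)
      | cons p ps => simp [buildSegs]
    · simp only [goSeg, if_neg hc, segsP]
      rw [ih (cur ++ [c])]
      cases h : segsP rest with
      | nil => exact absurd h (segsP_ne_nil rest)
      | cons p ps => simp

lemma goSeg_eq_none_iff : ∀ (cs cur : List Char),
    goSeg cur cs = none ↔ ((cs = [] ∧ cur = []) ∨ cs.getLast? = some ',') := by
  intro cs
  induction cs with
  | nil => intro cur; simp [goSeg]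
  | cons c rest ih =>
    intro cur
    by_cases hc : c = ','
    · subst hc
      rw [show goSeg cur (',' :: rest) =
            Option.map (fun t => capChars (cur ++ [',']) ++ ' ' :: t) (goSeg [] rest) from rfl]
      rw [Option.map_eq_none_iff, ih []]
      cases rest with
      | nil => simp
      | cons r rs => simp [List.getLast?_cons_cons]
    · simp only [goSeg, if_neg hc]
      rw [ih (cur ++ [c])]
      cases rest with
      | nil => simp [hc]
      | cons r rs => simp [List.getLast?_cons_cons]

lemma pyGet?_zero_eq_head? {α : Type} (l : List α) : PySem.List.pyGet? l 0 = l.head? := by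
  cases l <;> simp [PySem.List.pyGet?, PySem.List.pyIdx?]

lemma capChars_cons (c : Char) (t : List Char) :
    capChars (c :: t) = PySem.Chars.upperChar c :: t := by
  simp [capChars, PySem.List.slice_from (c :: t) (by norm_num : (0 : Int) ≤ 1)]

lemma slice_neg_one_dropLast {α : Type} (l : List α) :
    PySem.List.slice l none (some (-1)) = l.dropLast := by
  simp only [PySem.List.slice, PySem.List.clampIdx]
  cases l with
  | nil => simp
  | cons a t =>
    have h1 : ((-1:Int) < 0) := by norm_num
    simp only [if_pos h1, List.length_cons]
    have h2 : ¬ ((↑(t.length + 1) : Int) + (-1) < 0) := by omega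
    rw [if_neg h2]
    have h3 : ((↑(t.length + 1) : Int) + (-1)).toNat = t.length := by omega
    rw [h3, List.drop_zero, Nat.sub_zero, List.dropLast_eq_take]
    simp

lemma pyGetD_neg_one {α : Type} (l : List α) (d : α) :
    PySem.List.pyGetD l (-1) d = l.getLastD d := by
  simp only [PySem.List.pyGetD, PySem.List.pyGet?, PySem.List.pyIdx?]
  cases l with
  | nil => simp
  | cons a t =>
    have h0 : ¬ ((0:Int) ≤ -1) := by norm_num
    rw [if_neg h0]
    have h1 : (-(↑(a::t).length : Int) ≤ -1) := by simp
    rw [if_pos h1]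
    have h2 : (a::t).length - ((1:Int)).toNat = t.length := by simp
    simp only [Int.neg_neg]
    norm_num [h2]
    rw [List.getLast?_eq_getElem?]
    simp

lemma join_cons_ne_nil (a : List Char) (L : List (List Char)) (h : L ≠ []) :
    PySem.Chars.join [' '] (a :: L) = a ++ ' ' :: PySem.Chars.join [' '] L := by
  cases L with
  | nil => exact absurd rfl h
  | cons q rest => rw [PySem.Chars.join_cons_cons]; simp

lemma buildSegs_some : ∀ (parts : List (List Char)) (t : List Char),
    buildSegs parts = some t →
    t = PySem.Chars.join [' ']
          (parts.dropLast.map (fun p => capChars (p ++ [','])) ++ [capChars (parts.getLastD [])]) := by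
  intro parts
  induction parts with
  | nil => intro t h; simp [buildSegs] at h
  | cons p rest ih =>
    intro t h
    cases rest with
    | nil =>
      by_cases hp : p = []
      · subst hp; simp [buildSegs] at h
      · simp only [buildSegs, if_neg hp, Option.some.injEq] at h
        subst h
        simp [PySem.Chars.join_singleton]
    | cons q ps =>
      simp only [buildSegs, Option.map_eq_some_iff] at h
      obtain ⟨t', ht', rfl⟩ := h
      rw [ih t' ht']
      rw [show ((p :: q :: ps).dropLast) = p :: (q :: ps).dropLast from
            List.dropLast_cons_of_ne_nil (by simp)]
      have hlast : (p :: q :: ps).getLastD [] = (q :: ps).getLastD [] := by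
        rw [List.getLastD_eq_getLast?, List.getLastD_eq_getLast?, List.getLast?_cons_cons]
      rw [hlast, List.map_cons, List.cons_append]
      rw [join_cons_ne_nil _ _ (by simp)]

lemma lemA (cs : List Char) : ∀ (k a j : Nat) (acc : List Char),
    cs.length - a = k → j ≤ a → a ≤ cs.length →
    finishA cs ((PySem.List.pyRange a cs.length).foldl (stepA cs) (acc, (j : Int)))
      = (match goSeg ((cs.drop j).take (a - j)) (cs.drop a) with
         | none => ""
         | some t => String.ofList (helloNom (acc ++ t))) := by
  intro k
  induction k with
  | zero =>
    intro a j acc hk hj ha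
    have haa : a = cs.length := by omega
    subst haa
    have hr : PySem.List.pyRange (cs.length : Int) (cs.length : Int) = [] := by
      simp [PySem.List.pyRange]
    rw [hr, List.foldl_nil]
    unfold finishA
    rw [PySem.List.slice_from cs (by positivity)]
    simp only [Int.toNat_natCast]
    rw [List.take_of_length_le (by simp), List.drop_length]
    cases hd : cs.drop j with
    | nil => simp [goSeg, PySem.List.pyGet?, PySem.List.pyIdx?]
    | cons h0 tl =>
      rw [pyGet?_zero_eq_head?]
      simp only [List.head?_cons, goSeg, capChars_cons]
      rw [if_neg (by simp)]
      rw [PySem.List.slice_from (h0 :: tl) (by norm_num)]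
      simp
  | succ f ih =>
    intro a j acc hk hj ha
    have hlt : a < cs.length := by omega
    rw [PySem.List.pyRange_one_cons (by exact_mod_cast hlt), List.foldl_cons]
    rw [show ((a : Int) + 1) = ((a + 1 : Nat) : Int) by push_cast; ring]
    have hget : PySem.List.pyGetD cs (a : Int) ' ' = cs[a] := by
      rw [PySem.List.pyGetD_natCast, List.getD_eq_getElem _ _ hlt]
    have hdropa : cs.drop a = cs[a] :: cs.drop (a + 1) := List.drop_eq_getElem_cons hlt
    have htake : (cs.drop j).take (a + 1 - j) = (cs.drop j).take (a - j) ++ [cs[a]] := by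
      rw [show a + 1 - j = (a - j) + 1 by omega, List.take_add_one]
      congr 1
      rw [List.getElem?_drop, show j + (a - j) = a by omega,
          List.getElem?_eq_getElem hlt]
      rfl
    by_cases hc : cs[a] = ','
    · have hstep : stepA cs (acc, (j : Int)) a =
          (acc ++ capChars ((cs.drop j).take (a - j) ++ [',']) ++ [' '], ((a + 1 : Nat) : Int)) := by
        unfold stepA
        rw [hget, if_pos hc]
        rw [show ((a : Int) + 1) = ((a + 1 : Nat) : Int) by push_cast; ring]
        rw [PySem.List.slice_toNat cs (by positivity) (by positivity)]
        simp only [Int.toNat_natCast]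
        rw [htake, hc]
        cases hcur : (cs.drop j).take (a - j) with
        | nil =>
          simp only [List.nil_append]
          rw [pyGet?_zero_eq_head?]
          simp only [List.head?_cons, capChars_cons]
          rw [PySem.List.slice_from ([','] : List Char) (by norm_num)]
          simp
        | cons c0 tl =>
          simp only [List.cons_append]
          rw [pyGet?_zero_eq_head?]
          simp only [List.head?_cons, capChars_cons]
          rw [PySem.List.slice_from (c0 :: (tl ++ [','])) (by norm_num)]
          simp
      rw [hstep, ih (a + 1) (a + 1) _ (by omega) (by omega) (by omega)]
      rw [Nat.sub_self, List.take_zero, hdropa, hc]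
      rw [show goSeg ((cs.drop j).take (a - j)) (',' :: cs.drop (a + 1)) =
            Option.map (fun t => capChars ((cs.drop j).take (a - j) ++ [',']) ++ ' ' :: t)
              (goSeg [] (cs.drop (a + 1))) from rfl]
      cases hgs : goSeg [] (cs.drop (a + 1)) with
      | none => simp
      | some t => simp
    · have hstep : stepA cs (acc, (j : Int)) a = (acc, (j : Int)) := by
        unfold stepA
        rw [hget]
        exact if_neg hc
      rw [hstep, ih (a + 1) j acc (by omega) (by omega) (by omega)]
      rw [htake, hdropa]
      simp only [goSeg, if_neg hc]

-- ===== VERDICT (by name: the statement is the Claim_ definition above) =====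
theorem hello_plusieurs_noms_spec : Claim_equal_hello_plusieurs_noms := by
  intro noms _ hpre
  unfold Spec_hello_plusieurs_noms
  obtain ⟨hne, hlast⟩ := hpre
  have hA : hello_plusieurs_noms noms =
      (match goSeg [] noms.toList with
       | none => ""
       | some t => String.ofList (helloNom ([] ++ t))) := by
    have h0 := lemA noms.toList noms.toList.length 0 0 [] (by omega) (by omega) (by omega)
    simp only [Nat.cast_zero, Nat.zero_sub, List.take_zero, List.drop_zero] at h0
    exact h0
  have hsome : ∃ t, goSeg [] noms.toList = some t := by
    cases hgs : goSeg [] noms.toList with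
    | some t => exact ⟨t, rfl⟩
    | none =>
      rcases (goSeg_eq_none_iff noms.toList []).mp hgs with ⟨h1, _⟩ | h2
      · exact absurd h1 hne
      · exact absurd h2 hlast
  obtain ⟨t, ht⟩ := hsome
  have hbuild : buildSegs (segsP noms.toList) = some t := by
    rw [← ht, goSeg_eq_buildSegs]
    cases h : segsP noms.toList with
    | nil => exact absurd h (segsP_ne_nil noms.toList)
    | cons p ps => simp
  have htj := buildSegs_some (segsP noms.toList) t hbuild
  have hB : hello_plusieurs_noms_alt noms = String.ofList (helloNom (PySem.Chars.join [' ']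
      ((segsP noms.toList).dropLast.map (fun p => capChars (p ++ [','])) ++
        [capChars ((segsP noms.toList).getLastD [])]))) := by
    rw [show hello_plusieurs_noms_alt noms = String.ofList (helloNom (PySem.Chars.join [' ']
          ((PySem.List.slice (PySem.Chars.splitOn noms.toList [',']) none (some (-1))).map
              (fun p => capChars (p ++ [','])) ++
            [capChars (PySem.List.pyGetD (PySem.Chars.splitOn noms.toList [',']) (-1) [])])))
        from rfl]
    rw [splitOn_eq_segsP, slice_neg_one_dropLast, pyGetD_neg_one]
  rw [hA, ht, hB, htj]
  simp
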